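-- pv_equiv track=rewrite | github.com/kallesiukolaa/Snowflake_extract_db_objects | Snowflake_ddl_handler/__init__.py | __find_real_semicols
-- ===== SOURCE A (Python) =====
-- def __get_char_positions_from_string(char, string):
--     return [pos for pos, ch in enumerate(string) if ch == char]
--
-- def __commented_positions(string):
--     starts = __get_char_positions_from_string('/*', string)
--     ends = __get_char_positions_from_string('*/', string)
--     commented = []
--     for start, end in zip(starts, ends):
--         commented = commented + range(start, end + 1)
--     #Check if is in oneline comment
--     comment_chars = ["--", "//"]
--     for comment_char in comment_chars:
--         comments = __get_char_positions_from_string(comment_char, string)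
--         for comment in comments:
--             while string[comment] != '\n' and comment < len(string):
--                 commented.append(comment)
--                 comment = comment + 1
--     return commented
--
-- def __is_between_chars(position, char_positions):
--     for i in range(len(char_positions) - 1):
--         if position < char_positions[i + 1] and position > char_positions[i] and i % 2 == 0:
--             return True
--     return False
--
-- def __remove_from_list(list, sublist):
--     for value in sublist:
--         try:
--             list.remove(value)
--         except ValueError:
--             1==1
--     return list
--
-- def __remove_chars_inside(chars_1, chars_2):
--     open_1 = False #Example if we have dfdsfssdfsdf'dfsffd.. its open for '
--     open_2 = False
--     all_values = sorted(chars_1 + chars_2)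
--     for value in all_values:
--         if value in chars_1:
--             if not open_2 and not open_1:
--                 open_1 = True
--                 continue
--             if not open_2 and open_1:
--                 open_1 = False
--                 continue
--             if open_2:
--                 chars_1.remove(value)
--         if value in chars_2:
--             if not open_1 and not open_2:
--                 open_2 = True
--                 continue
--             if not open_1 and open_2:
--                 open_2 = False
--                 continue
--             if open_1:
--                 chars_2.remove(value)
--     return [chars_1, chars_2]
--
-- def __find_real_semicols(string):
--     is_quotes = __get_char_positions_from_string('\'', string)
--     is_dquotes = __get_char_positions_from_string('\"', string)
--     is_scolons = __get_char_positions_from_string(';', string)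
--     commented = __commented_positions(string)
--     is_quotes = __remove_from_list(is_quotes, commented)
--     is_dquotes = __remove_from_list(is_dquotes, commented)
--     is_scolons = __remove_from_list(is_scolons, commented)
--     #We need to check which quotes and duoble quotes are part of some name etc.
--     [is_quotes, is_dquotes] = __remove_chars_inside(is_quotes, is_dquotes)
--     scols = []
--     for pos in is_scolons:
--         if not (__is_between_chars(pos, is_quotes) or __is_between_chars(pos, is_dquotes)):
--             scols.append(pos)
--     return scols
-- ===== SOURCE B (Python) =====
-- def __find_real_semicols(string):
--     # Single O(n) pass with a quote-mode state machine; semicolons seen while a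
--     # quote is open are held in 'pending' and dropped only when the quote closes
--     # (an unmatched trailing quote leaves them real, as the pairing rule demands).
--     mode = None
--     result = []
--     pending = []
--     for pos, ch in enumerate(string):
--         if ch == ';':
--             if mode is None:
--                 result.append(pos)
--             else:
--                 pending.append(pos)
--         elif ch == "'" or ch == '"':
--             if mode is None:
--                 mode = ch
--                 pending = []
--             elif mode == ch:
--                 mode = None
--                 pending = []
--     if mode is not None:
--         result += pending
--     return result
-- ===== Notes on version B (the rewrite author's own statement) =====
-- stated objective: faster
-- what changed: Replaces A's multi-pass pipeline (per-character position lists, a quadratic remove/membership state machine over a sorted merge of quote positions, and a per-semicolon scan over all quote pairs) with a single linear left-to-right pass holding only the current quote mode, the emitted semicolons, and the semicolons pending inside the currently open quote.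
import Mathlib
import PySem

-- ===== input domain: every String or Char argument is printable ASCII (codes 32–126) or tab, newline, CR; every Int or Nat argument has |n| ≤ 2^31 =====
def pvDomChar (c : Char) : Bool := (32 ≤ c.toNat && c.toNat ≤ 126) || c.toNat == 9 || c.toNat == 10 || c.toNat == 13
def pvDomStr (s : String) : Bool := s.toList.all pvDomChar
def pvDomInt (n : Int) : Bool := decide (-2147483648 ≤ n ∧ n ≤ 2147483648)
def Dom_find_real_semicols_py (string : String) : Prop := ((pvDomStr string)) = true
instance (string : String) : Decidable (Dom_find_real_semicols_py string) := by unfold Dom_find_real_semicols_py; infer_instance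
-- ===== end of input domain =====

-- B replaces A's quadratic pipeline (position lists, pair-removal state machine over a sorted
-- merge, and a per-semicolon scan over quote pairs) by one linear pass with a quote-mode state
-- machine; equal return value on every input (neither mutates its argument).

-- ===== PORT A =====
-- [pos for pos, ch in enumerate(string) if ch == char]
def pvGetCharPositions (char : String) (s : List Char) : List Int :=
  ((PySem.List.enumerate s).filter (fun pc => String.singleton pc.2 == char)).map (fun pc => pc.1)

-- the 'while string[comment] != '\n' and comment < len(string)' loop of __commented_positions;
-- fuel-bounded; the 'none' arm is where Python would raise IndexError (unreachable: the loop only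
-- runs for two-character markers, which the single-character scan never finds)
def pvCommentWhile (s : List Char) (fuel : Nat) (comment : Int) (acc : List Int) : List Int :=
  match fuel with
  | 0 => acc
  | fuel + 1 =>
    match PySem.List.pyGet? s comment with
    | none => acc
    | some ch =>
      if ch != '\n' && decide (comment < (s.length : Int)) then
        pvCommentWhile s fuel (comment + 1) (acc ++ [comment])
      else acc

-- __commented_positions (its '/*', '*/', '--', '//' scans compare a single char with a
-- two-char string, so every branch is dead; 'commented + range(...)' — a TypeError in
-- Python 3 — is ported as list append, unreachable since zip([], []) = [])
def pvCommentedPositions (s : List Char) : List Int :=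
  let starts := pvGetCharPositions "/*" s
  let ends := pvGetCharPositions "*/" s
  let commented := ((starts.zip ends).foldl
    (fun acc se => acc ++ PySem.List.pyRange se.1 (se.2 + 1) 1) [])
  ["--", "//"].foldl (fun acc cchar =>
    (pvGetCharPositions cchar s).foldl
      (fun acc2 comment => pvCommentWhile s (s.length + 1) comment acc2) acc) commented

-- __remove_from_list ('try: list.remove(value) except ValueError: pass')
def pvRemoveFromList (l : List Int) (sub : List Int) : List Int :=
  sub.foldl (fun acc v =>
    match PySem.List.remove? acc v with
    | some l' => l'
    | none => acc) l

-- the 'if value in chars_2: …' block of __remove_chars_inside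
def pvRciSecond (c1 c2 : List Int) (o1 o2 : Bool) (v : Int) :
    List Int × List Int × Bool × Bool :=
  if v ∈ c2 then
    if !o1 && !o2 then (c1, c2, o1, true)
    else if !o1 && o2 then (c1, c2, o1, false)
    else if o1 then (c1, ((PySem.List.remove? c2 v).getD c2), o1, o2)
    else (c1, c2, o1, o2)
  else (c1, c2, o1, o2)

-- one iteration of __remove_chars_inside's loop ('continue' after a toggle skips the second block)
def pvRciStep (st : List Int × List Int × Bool × Bool) (v : Int) :
    List Int × List Int × Bool × Bool :=
  match st with
  | (c1, c2, o1, o2) =>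
    if v ∈ c1 then
      if !o2 && !o1 then (c1, c2, true, o2)
      else if !o2 && o1 then (c1, c2, false, o2)
      else pvRciSecond ((PySem.List.remove? c1 v).getD c1) c2 o1 o2 v
    else pvRciSecond c1 c2 o1 o2 v

-- __remove_chars_inside
def pvRemoveCharsInside (c1 c2 : List Int) : List Int × List Int :=
  let all := PySem.List.sorted (c1 ++ c2) (fun x => x)
  let st := all.foldl pvRciStep (c1, c2, false, false)
  (st.1, st.2.1)

-- __is_between_chars
def pvIsBetween (p : Int) (cps : List Int) : Bool :=
  (List.range (cps.length - 1)).any (fun i =>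
    decide (p < PySem.List.pyGetD cps ((i : Int) + 1) 0) &&
    decide (PySem.List.pyGetD cps ((i : Int)) 0 < p) && (i % 2 == 0))

def find_real_semicols_py (string : String) : List Int :=
  let s := string.toList
  let is_quotes := pvGetCharPositions "'" s
  let is_dquotes := pvGetCharPositions "\"" s
  let is_scolons := pvGetCharPositions ";" s
  let commented := pvCommentedPositions s
  let is_quotes := pvRemoveFromList is_quotes commented
  let is_dquotes := pvRemoveFromList is_dquotes commented
  let is_scolons := pvRemoveFromList is_scolons commented
  let qd := pvRemoveCharsInside is_quotes is_dquotes
  is_scolons.foldl (fun acc pos =>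
    if !(pvIsBetween pos qd.1 || pvIsBetween pos qd.2) then acc ++ [pos] else acc) []

-- ===== PORT B =====
-- one iteration of Source B's single loop
def pvAltStep (st : Option Char × List Int × List Int) (pc : Int × Char) :
    Option Char × List Int × List Int :=
  match st with
  | (mode, result, pending) =>
    if pc.2 == ';' then
      match mode with
      | none => (mode, result ++ [pc.1], pending)
      | some _ => (mode, result, pending ++ [pc.1])
    else if pc.2 == '\'' || pc.2 == '"' then
      match mode with
      | none => (some pc.2, result, [])
      | some q => if q == pc.2 then (none, result, []) else (mode, result, pending)
    else (mode, result, pending)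

def find_real_semicols_py_alt (string : String) : List Int :=
  match (PySem.List.enumerate string.toList).foldl pvAltStep (none, [], []) with
  | (mode, result, pending) =>
    match mode with
    | some _ => result ++ pending
    | none => result

-- ===== PRECONDITION & SPEC =====
def Spec_find_real_semicols_py (string : String) (out : List Int) : Prop := out = find_real_semicols_py_alt string
instance (string : String) (out : List Int) : Decidable (Spec_find_real_semicols_py string out) := by unfold Spec_find_real_semicols_py; infer_instance

-- ===== CLAIM (what is proved, stated in full; the proofs are below) =====
def Claim_equal_find_real_semicols_py : Prop := ∀ (string : String), Dom_find_real_semicols_py string → Spec_find_real_semicols_py string (find_real_semicols_py string)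

-- ===== LEMMAS AND PROOFS =====

-- positions of the characters satisfying P (proof-side view of pvGetCharPositions)
def posP (P : Char → Bool) (s : List Char) : List Int :=
  ((PySem.List.enumerate s).filter (fun pc => P pc.2)).map (fun pc => pc.1)

def isQ1 (c : Char) : Bool := c == '\''
def isQ2 (c : Char) : Bool := c == '"'
def isSC (c : Char) : Bool := c == ';'
def isQQ (c : Char) : Bool := c == '\'' || c == '"'

-- state of __remove_chars_inside's loop after the whole string s
def rciState (s : List Char) : List Int × List Int × Bool × Bool :=
  (posP isQQ s).foldl pvRciStep (posP isQ1 s, posP isQ2 s, false, false)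

-- what A returns on s
def aFilter (s : List Char) : List Int :=
  (posP isSC s).filter
    (fun p => !(pvIsBetween p (rciState s).1 || pvIsBetween p (rciState s).2.1))

-- state of B's loop after the whole string s
def bState (s : List Char) : Option Char × List Int × List Int :=
  (PySem.List.enumerate s).foldl pvAltStep (none, [], [])

lemma getCharPositions_q1 (s : List Char) : pvGetCharPositions "'" s = posP isQ1 s := by
  unfold pvGetCharPositions posP
  congr 1
  apply List.filter_congr
  intro pc _
  simp [String.singleton, ← String.toList_inj, isQ1]

lemma getCharPositions_q2 (s : List Char) : pvGetCharPositions "\"" s = posP isQ2 s := by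
  unfold pvGetCharPositions posP
  congr 1
  apply List.filter_congr
  intro pc _
  simp [String.singleton, ← String.toList_inj, isQ2]

lemma getCharPositions_sc (s : List Char) : pvGetCharPositions ";" s = posP isSC s := by
  unfold pvGetCharPositions posP
  congr 1
  apply List.filter_congr
  intro pc _
  simp [String.singleton, ← String.toList_inj, isSC]

lemma getCharPositions_two (char : String) (s : List Char)
    (h : ∀ c : Char, (String.singleton c == char) = false) :
    pvGetCharPositions char s = [] := by
  unfold pvGetCharPositions
  rw [List.filter_eq_nil_iff.mpr (fun pc _ => by simp [h pc.2])]
  rfl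

lemma commentedPositions_nil (s : List Char) : pvCommentedPositions s = [] := by
  unfold pvCommentedPositions
  simp only [List.foldl_cons, List.foldl_nil]
  rw [getCharPositions_two "/*" s (fun c => by simp [String.singleton, ← String.toList_inj]),
    getCharPositions_two "*/" s (fun c => by simp [String.singleton, ← String.toList_inj]),
    getCharPositions_two "--" s (fun c => by simp [String.singleton, ← String.toList_inj]),
    getCharPositions_two "//" s (fun c => by simp [String.singleton, ← String.toList_inj])]
  simp

lemma posP_append (P : Char → Bool) (s : List Char) (c : Char) :
    posP P (s ++ [c]) = posP P s ++ (if P c then [(s.length : Int)] else []) := by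
  unfold posP
  rw [PySem.List.enumerate_append]
  by_cases h : P c <;>
    simp [PySem.List.enumerate_cons, PySem.List.enumerate_nil, h]

lemma mem_posP (P : Char → Bool) (s : List Char) (x : Int) :
    x ∈ posP P s ↔ ∃ (k : Nat) (h : k < s.length), x = (k : Int) ∧ P s[k] := by
  unfold posP
  simp only [List.mem_map, List.mem_filter, PySem.List.mem_enumerate_iff]
  constructor
  · rintro ⟨a, ⟨⟨k, h, rfl⟩, hP⟩, rfl⟩
    exact ⟨k, h, by simp, by simpa using hP⟩
  · rintro ⟨k, h, rfl, hP⟩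
    exact ⟨((k : Int), s[k]), ⟨⟨k, h, by simp⟩, by simpa using hP⟩, rfl⟩

lemma posP_bounds (P : Char → Bool) (s : List Char) (x : Int) (hx : x ∈ posP P s) :
    0 ≤ x ∧ x < (s.length : Int) := by
  rcases (mem_posP P s x).mp hx with ⟨k, h, rfl, -⟩
  constructor
  · exact Int.natCast_nonneg k
  · exact_mod_cast h

lemma posP_pairwise (P : Char → Bool) (s : List Char) : (posP P s).Pairwise (· < ·) := by
  unfold posP
  rw [List.pairwise_map]
  exact (PySem.List.pairwise_lt_enumerate s 0).filter _

lemma posP_ne (P Q : Char → Bool) (hPQ : ∀ c, ¬(P c = true ∧ Q c = true)) (s : List Char)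
    (x y : Int) (hx : x ∈ posP P s) (hy : y ∈ posP Q s) : x ≠ y := by
  rcases (mem_posP P s x).mp hx with ⟨k, hk, rfl, hP⟩
  rcases (mem_posP Q s y).mp hy with ⟨m, hm, rfl, hQ⟩
  intro hxy
  have : k = m := by exact_mod_cast hxy
  subst this
  exact hPQ s[k] ⟨hP, hQ⟩

lemma posP_qq_perm (s : List Char) : (posP isQQ s).Perm (posP isQ1 s ++ posP isQ2 s) := by
  induction s using List.reverseRecOn with
  | nil => simp [posP, PySem.List.enumerate_nil]
  | append_singleton s c ih =>
    rw [posP_append, posP_append, posP_append]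
    by_cases h1 : c = '\''
    · subst h1
      simp [show isQ1 '\'' = true from by decide, show isQ2 '\'' = false from by decide,
        show isQQ '\'' = true from by decide]
      refine ((ih.append_right [((s.length : Int))]).trans List.perm_append_comm).trans ?_
      simpa using List.perm_middle.symm
    · by_cases h2 : c = '"'
      · simp only [isQ1, isQ2, isQQ, h2, beq_self_eq_true, Bool.or_true, if_true]
        have h3 : ('"' == '\'') = false := by decide
        simp only [h3]
        simpa [List.append_assoc] using ih.append_right [((s.length : Int))]
      · have e1 : isQ1 c = false := by simp [isQ1, h1]
        have e2 : isQ2 c = false := by simp [isQ2, h2]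
        have e3 : isQQ c = false := by simp [isQQ, h1, h2]
        simpa [e1, e2, e3] using ih

lemma sorted_q1_q2 (s : List Char) :
    PySem.List.sorted (posP isQ1 s ++ posP isQ2 s) (fun x => x) = posP isQQ s := by
  exact PySem.List.sorted_eq_of_perm_of_pairwise_lt _ _ _ (posP_qq_perm s) (posP_pairwise isQQ s)

lemma rciSecond_fst (c1 c2 : List Int) (o1 o2 : Bool) (v : Int) :
    (pvRciSecond c1 c2 o1 o2 v).1 = c1 := by
  unfold pvRciSecond; split_ifs <;> rfl

lemma rciSecond_snd (c1 c1' c2 : List Int) (o1 o2 : Bool) (v : Int) :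
    (pvRciSecond c1 c2 o1 o2 v).2 = (pvRciSecond c1' c2 o1 o2 v).2 := by
  unfold pvRciSecond; split_ifs <;> rfl

lemma rciSecond_fresh2 (c1 c2 : List Int) (o1 o2 : Bool) (v n : Int) (hv : v ≠ n) :
    pvRciSecond c1 (c2 ++ [n]) o1 o2 v =
      ((pvRciSecond c1 c2 o1 o2 v).1, (pvRciSecond c1 c2 o1 o2 v).2.1 ++ [n],
        (pvRciSecond c1 c2 o1 o2 v).2.2) := by
  unfold pvRciSecond
  have hmem : (v ∈ c2 ++ [n]) ↔ v ∈ c2 := by simp [hv]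
  by_cases hm : v ∈ c2
  · rw [if_pos (hmem.mpr hm), if_pos hm]
    by_cases b1 : (!o1 && !o2) = true
    · simp [b1]
    · by_cases b2 : (!o1 && o2) = true
      · simp [b1, b2]
      · by_cases b3 : o1 = true
        · simp only [b3, if_true]
          rw [PySem.List.remove?_eq_some_erase _ v (hmem.mpr hm),
            PySem.List.remove?_eq_some_erase _ v hm]
          simp [List.erase_append_left _ hm]
        · have ho1 : o1 = false := by simpa using b3
          subst ho1
          cases o2 <;> simp_all
  · rw [if_neg (fun h => hm (hmem.mp h)), if_neg hm]

lemma rciStep_fresh1 (c1 c2 : List Int) (o1 o2 : Bool) (v n : Int) (hv : v ≠ n) :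
    pvRciStep (c1 ++ [n], c2, o1, o2) v =
      ((pvRciStep (c1, c2, o1, o2) v).1 ++ [n], (pvRciStep (c1, c2, o1, o2) v).2) := by
  simp only [pvRciStep]
  have hmem : (v ∈ c1 ++ [n]) ↔ v ∈ c1 := by simp [hv]
  by_cases hm : v ∈ c1
  · rw [if_pos (hmem.mpr hm), if_pos hm]
    by_cases b1 : (!o2 && !o1) = true
    · simp [b1]
    · by_cases b2 : (!o2 && o1) = true
      · simp [b1, b2]
      · simp only [b1, b2, if_false, Bool.false_eq_true]
        rw [PySem.List.remove?_eq_some_erase _ v (hmem.mpr hm),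
          PySem.List.remove?_eq_some_erase _ v hm]
        simp only [Option.getD_some]
        rw [List.erase_append_left _ hm]
        refine Prod.ext ?_ ?_
        · simp [rciSecond_fst]
        · exact rciSecond_snd _ _ _ _ _ _
  · rw [if_neg (fun h => hm (hmem.mp h)), if_neg hm]
    refine Prod.ext ?_ ?_
    · simp [rciSecond_fst]
    · exact rciSecond_snd _ _ _ _ _ _

lemma rciStep_fresh2 (c1 c2 : List Int) (o1 o2 : Bool) (v n : Int) (hv : v ≠ n) :
    pvRciStep (c1, c2 ++ [n], o1, o2) v =
      ((pvRciStep (c1, c2, o1, o2) v).1, (pvRciStep (c1, c2, o1, o2) v).2.1 ++ [n],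
        (pvRciStep (c1, c2, o1, o2) v).2.2) := by
  simp only [pvRciStep]
  by_cases hm : v ∈ c1
  · rw [if_pos hm, if_pos hm]
    by_cases b1 : (!o2 && !o1) = true
    · simp [b1]
    · by_cases b2 : (!o2 && o1) = true
      · simp [b1, b2]
      · simp only [b1, b2, if_false, Bool.false_eq_true]
        exact rciSecond_fresh2 _ _ _ _ _ _ hv
  · rw [if_neg hm, if_neg hm]
    exact rciSecond_fresh2 _ _ _ _ _ _ hv

lemma foldl_fresh1 (vs : List Int) (n : Int) :
    ∀ (c1 c2 : List Int) (o1 o2 : Bool), (∀ v ∈ vs, v ≠ n) →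
      vs.foldl pvRciStep (c1 ++ [n], c2, o1, o2) =
        ((vs.foldl pvRciStep (c1, c2, o1, o2)).1 ++ [n],
          (vs.foldl pvRciStep (c1, c2, o1, o2)).2) := by
  induction vs with
  | nil => intros; rfl
  | cons v vs ih =>
    intro c1 c2 o1 o2 hn
    simp only [List.foldl_cons]
    rw [rciStep_fresh1 c1 c2 o1 o2 v n (hn v (by simp))]
    have h := ih (pvRciStep (c1, c2, o1, o2) v).1 (pvRciStep (c1, c2, o1, o2) v).2.1
      (pvRciStep (c1, c2, o1, o2) v).2.2.1 (pvRciStep (c1, c2, o1, o2) v).2.2.2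
      (fun u hu => hn u (by simp [hu]))
    simpa using h

lemma foldl_fresh2 (vs : List Int) (n : Int) :
    ∀ (c1 c2 : List Int) (o1 o2 : Bool), (∀ v ∈ vs, v ≠ n) →
      vs.foldl pvRciStep (c1, c2 ++ [n], o1, o2) =
        ((vs.foldl pvRciStep (c1, c2, o1, o2)).1,
          (vs.foldl pvRciStep (c1, c2, o1, o2)).2.1 ++ [n],
          (vs.foldl pvRciStep (c1, c2, o1, o2)).2.2) := by
  induction vs with
  | nil => intros; rfl
  | cons v vs ih =>
    intro c1 c2 o1 o2 hn
    simp only [List.foldl_cons]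
    rw [rciStep_fresh2 c1 c2 o1 o2 v n (hn v (by simp))]
    have h := ih (pvRciStep (c1, c2, o1, o2) v).1 (pvRciStep (c1, c2, o1, o2) v).2.1
      (pvRciStep (c1, c2, o1, o2) v).2.2.1 (pvRciStep (c1, c2, o1, o2) v).2.2.2
      (fun u hu => hn u (by simp [hu]))
    simpa using h

lemma any_congr_mem {α : Type} (l : List α) (p q : α → Bool) (h : ∀ x ∈ l, p x = q x) :
    l.any p = l.any q := by
  induction l with
  | nil => rfl
  | cons a l ih => simp [h a (by simp), ih (fun x hx => h x (by simp [hx]))]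

-- the two indexed reads of __is_between_chars agree with the original list below its length
lemma between_body_eq (cps : List Int) (n p : Int) (i : Nat) (hi : i < cps.length - 1) :
    (decide (p < PySem.List.pyGetD (cps ++ [n]) ((i : Int) + 1) 0) &&
      decide (PySem.List.pyGetD (cps ++ [n]) ((i : Int)) 0 < p) && (i % 2 == 0)) =
    (decide (p < PySem.List.pyGetD cps ((i : Int) + 1) 0) &&
      decide (PySem.List.pyGetD cps ((i : Int)) 0 < p) && (i % 2 == 0)) := by
  have h1 : (0 : Int) ≤ (i : Int) + 1 := by positivity
  have hlen : i + 1 < cps.length := by omega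
  have h2 : (i : Int) + 1 < (cps.length : Int) := by exact_mod_cast hlen
  have h2' : (i : Int) + 1 < ((cps ++ [n]).length : Int) := by
    simp only [List.length_append, List.length_cons, List.length_nil]
    push_cast
    omega
  have h3 : (0 : Int) ≤ (i : Int) := by positivity
  have h4 : (i : Int) < (cps.length : Int) := by exact_mod_cast (by omega : i < cps.length)
  have h4' : (i : Int) < ((cps ++ [n]).length : Int) := by
    simp only [List.length_append, List.length_cons, List.length_nil]
    push_cast
    omega
  rw [PySem.List.pyGetD_eq_getElem _ 0 h1 h2', PySem.List.pyGetD_eq_getElem _ 0 h1 h2,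
    PySem.List.pyGetD_eq_getElem _ 0 h3 h4', PySem.List.pyGetD_eq_getElem _ 0 h3 h4]
  congr 2
  · congr 1
    rw [List.getElem_append_left]
  · congr 1
    rw [List.getElem_append_left]

lemma between_append_even (cps : List Int) (n p : Int) (h : cps.length % 2 = 0) :
    pvIsBetween p (cps ++ [n]) = pvIsBetween p cps := by
  unfold pvIsBetween
  have hl : (cps ++ [n]).length - 1 = cps.length := by simp
  rw [hl]
  rcases Nat.eq_zero_or_pos cps.length with h0 | hpos
  · rw [List.length_eq_zero_iff.mp h0]
    simp
  · rw [show cps.length = (cps.length - 1) + 1 from (Nat.succ_pred_eq_of_pos hpos).symm,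
      List.range_succ, List.any_append]
    rw [any_congr_mem _ _ _ (fun i hi => between_body_eq cps n p i (List.mem_range.mp hi))]
    have hpar : ((cps.length - 1) % 2 == 0) = false := by
      have : (cps.length - 1) % 2 = 1 := by omega
      simp [this]
    simp [hpar]

lemma between_append_odd (cps : List Int) (n p t : Int) (h : cps.length % 2 = 1)
    (ht : cps.getLast? = some t) :
    pvIsBetween p (cps ++ [n]) =
      (pvIsBetween p cps || (decide (t < p) && decide (p < n))) := by
  unfold pvIsBetween
  have hl : (cps ++ [n]).length - 1 = cps.length := by simp
  rw [hl]
  have hpos : 0 < cps.length := by omega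
  rw [show cps.length = (cps.length - 1) + 1 from (Nat.succ_pred_eq_of_pos hpos).symm,
    List.range_succ, List.any_append]
  rw [any_congr_mem _ _ _ (fun i hi => between_body_eq cps n p i (List.mem_range.mp hi))]
  have hne : cps ≠ [] := List.length_pos_iff.mp hpos
  have htl : t = cps[cps.length - 1] := by
    rw [List.getLast?_eq_getElem?, List.getElem?_eq_getElem (by omega)] at ht
    exact (Option.some_inj.mp ht).symm
  have e1 : PySem.List.pyGetD (cps ++ [n]) (((cps.length - 1 : Nat) : Int) + 1) 0 = n := by
    have h1 : (0 : Int) ≤ ((cps.length - 1 : Nat) : Int) + 1 := by positivity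
    have h2 : ((cps.length - 1 : Nat) : Int) + 1 < ((cps ++ [n]).length : Int) := by
      simp only [List.length_append, List.length_cons, List.length_nil]
      push_cast
      omega
    rw [PySem.List.pyGetD_eq_getElem _ 0 h1 h2]
    have hidx : (((cps.length - 1 : Nat) : Int) + 1).toNat = cps.length := by omega
    simp only [hidx]
    rw [List.getElem_append_right (by omega)]
    simp
  have e2 : PySem.List.pyGetD (cps ++ [n]) ((cps.length - 1 : Nat) : Int) 0 = t := by
    have h3 : (0 : Int) ≤ ((cps.length - 1 : Nat) : Int) := by positivity
    have h4 : ((cps.length - 1 : Nat) : Int) < ((cps ++ [n]).length : Int) := by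
      simp only [List.length_append, List.length_cons, List.length_nil]
      push_cast
      omega
    rw [PySem.List.pyGetD_eq_getElem _ 0 h3 h4]
    rw [htl]
    have hidx : (((cps.length - 1 : Nat) : Int)).toNat = cps.length - 1 := by omega
    simp only [hidx]
    rw [List.getElem_append_left (by omega)]
  have hpar : ((cps.length - 1) % 2 == 0) = true := by
    have : (cps.length - 1) % 2 = 0 := by omega
    simp [this]
  simp only [List.any_cons, List.any_nil, e1, e2, hpar, Bool.and_true, Bool.or_false]
  congr 1
  rw [Bool.and_comm]

lemma between_ge (cps : List Int) (n : Int) (h : ∀ x ∈ cps, x < n) :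
    pvIsBetween n cps = false := by
  unfold pvIsBetween
  rw [List.any_eq_false]
  intro i hi
  rw [List.mem_range] at hi
  have h1 : (0 : Int) ≤ (i : Int) + 1 := by positivity
  have h2 : (i : Int) + 1 < (cps.length : Int) := by
    have : i + 1 < cps.length := by omega
    exact_mod_cast this
  have hA : decide (n < PySem.List.pyGetD cps ((i : Int) + 1) 0) = false := by
    rw [PySem.List.pyGetD_eq_getElem cps 0 h1 h2]
    exact decide_eq_false (not_lt.mpr (h _ (List.getElem_mem _)).le)
  simp [hA]

lemma filter_lt_append_filter_gt (l : List Int) (t : Int) (hp : l.Pairwise (· < ·))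
    (hne : ∀ p ∈ l, p ≠ t) :
    l.filter (fun p => decide (p < t)) ++ l.filter (fun p => decide (t < p)) = l := by
  induction l with
  | nil => rfl
  | cons a l ih =>
    rw [List.pairwise_cons] at hp
    rcases hp with ⟨ha, hp⟩
    have hane : a ≠ t := hne a (by simp)
    by_cases hat : a < t
    · have h2 : ¬ t < a := by omega
      have e1 : (decide (a < t)) = true := by simp [hat]
      have e2 : (decide (t < a)) = false := by simp [h2]
      simp only [List.filter_cons, e1, e2, if_true, Bool.false_eq_true, if_false]
      rw [List.cons_append, ih hp (fun p hp' => hne p (by simp [hp']))]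
    · have h3 : t < a := by omega
      have hfl : l.filter (fun p => decide (p < t)) = [] :=
        List.filter_eq_nil_iff.mpr (fun p hp' => by
          have := ha p hp'
          simp
          omega)
      have hfg : l.filter (fun p => decide (t < p)) = l :=
        List.filter_eq_self.mpr (fun p hp' => by
          have := ha p hp'
          simp
          omega)
      have e1 : (decide (a < t)) = false := by simp [hat]
      have e2 : (decide (t < a)) = true := by simp [h3]
      simp only [List.filter_cons, e1, e2, if_true, Bool.false_eq_true, if_false, hfl, hfg,
        List.nil_append]

lemma bState_append (s : List Char) (c : Char) :
    bState (s ++ [c]) = pvAltStep (bState s) ((s.length : Int), c) := by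
  unfold bState
  rw [PySem.List.enumerate_append, List.foldl_append]
  simp [PySem.List.enumerate_cons, PySem.List.enumerate_nil]

lemma posP_mono (P : Char → Bool) (s : List Char) (c : Char) (x : Int)
    (hx : x ∈ posP P s) : x ∈ posP P (s ++ [c]) := by
  rw [posP_append]
  exact List.mem_append_left _ hx

lemma qq_ne_n (s : List Char) (v : Int) (hv : v ∈ posP isQQ s) : v ≠ (s.length : Int) := by
  have := posP_bounds _ _ _ hv
  omega

lemma pairwise_append_lt (l : List Int) (n : Int) (hp : l.Pairwise (· < ·))
    (hlt : ∀ x ∈ l, x < n) : (l ++ [n]).Pairwise (· < ·) := by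
  refine List.pairwise_append.mpr ⟨hp, List.pairwise_singleton _ _, ?_⟩
  intro x hx y hy
  rw [List.mem_singleton] at hy
  subst hy
  exact hlt x hx

lemma rciState_append_other (s : List Char) (c : Char) (h : isQQ c = false) :
    rciState (s ++ [c]) = rciState s := by
  have hh : ¬ c = '\'' ∧ ¬ c = '"' := by
    constructor <;> intro he <;> subst he <;> simp [isQQ] at h
  have h1 : isQ1 c = false := by simp [isQ1, hh.1]
  have h2 : isQ2 c = false := by simp [isQ2, hh.2]
  unfold rciState
  rw [posP_append, posP_append, posP_append]
  simp [h, h1, h2]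

lemma rciState_append_q1 (s : List Char) :
    rciState (s ++ ['\'']) =
      pvRciStep ((rciState s).1 ++ [(s.length : Int)], (rciState s).2.1,
        (rciState s).2.2.1, (rciState s).2.2.2) ((s.length : Int)) := by
  unfold rciState
  rw [posP_append, posP_append, posP_append]
  simp only [show isQ1 '\'' = true from by decide, show isQ2 '\'' = false from by decide,
    show isQQ '\'' = true from by decide, if_true, Bool.false_eq_true, if_false,
    List.append_nil]
  rw [List.foldl_append,
    foldl_fresh1 (posP isQQ s) ((s.length : Int)) (posP isQ1 s) (posP isQ2 s) false false
      (fun v hv => qq_ne_n s v hv)]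
  rfl

lemma rciState_append_q2 (s : List Char) :
    rciState (s ++ ['"']) =
      pvRciStep ((rciState s).1, (rciState s).2.1 ++ [(s.length : Int)],
        (rciState s).2.2.1, (rciState s).2.2.2) ((s.length : Int)) := by
  unfold rciState
  rw [posP_append, posP_append, posP_append]
  simp only [show isQ1 '"' = false from by decide, show isQ2 '"' = true from by decide,
    show isQQ '"' = true from by decide, if_true, Bool.false_eq_true, if_false,
    List.append_nil]
  rw [List.foldl_append,
    foldl_fresh2 (posP isQQ s) ((s.length : Int)) (posP isQ1 s) (posP isQ2 s) false false
      (fun v hv => qq_ne_n s v hv)]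
  rfl

lemma aFilter_pairwise (s : List Char) : (aFilter s).Pairwise (· < ·) :=
  (posP_pairwise isSC s).filter _

lemma mem_aFilter_sc (s : List Char) (p : Int) (hp : p ∈ aFilter s) : p ∈ posP isSC s :=
  List.mem_of_mem_filter hp

lemma mem_of_getLast?' (l : List Int) (t : Int) (ht : l.getLast? = some t) : t ∈ l := by
  have hne : l ≠ [] := by
    intro h
    subst h
    simp at ht
  rw [List.getLast?_eq_getElem?, List.getElem?_eq_getElem (by
    have := List.length_pos_iff.mpr hne
    omega)] at ht
  rw [← Option.some_inj.mp ht]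
  exact List.getElem_mem _

lemma sc_ne_q (s : List Char) (p t : Int) (hp : p ∈ posP isSC s)
    (ht : t ∈ posP isQ1 s ∨ t ∈ posP isQ2 s) : p ≠ t := by
  rcases ht with ht | ht
  · exact posP_ne isSC isQ1 (by intro c hc; rcases hc with ⟨h1, h2⟩
      <;> simp [isSC, isQ1] at h1 h2 <;> subst h1 <;> exact absurd h2 (by decide)) s p t hp ht
  · exact posP_ne isSC isQ2 (by intro c hc; rcases hc with ⟨h1, h2⟩
      <;> simp [isSC, isQ2] at h1 h2 <;> subst h1 <;> exact absurd h2 (by decide)) s p t hp ht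

-- the master invariant tying A's intermediate data to B's loop state
def pvInv (s : List Char) : Prop :=
  (rciState s).2.2.1 = decide ((bState s).1 = some '\'') ∧
  (rciState s).2.2.2 = decide ((bState s).1 = some '"') ∧
  ((rciState s).1.length % 2 = 1 ↔ (bState s).1 = some '\'') ∧
  ((rciState s).2.1.length % 2 = 1 ↔ (bState s).1 = some '"') ∧
  (rciState s).1.Pairwise (· < ·) ∧ (rciState s).2.1.Pairwise (· < ·) ∧
  (∀ x ∈ (rciState s).1, x ∈ posP isQ1 s) ∧
  (∀ x ∈ (rciState s).2.1, x ∈ posP isQ2 s) ∧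
  (((bState s).1 = none ∧ (bState s).2.1 = aFilter s ∧ (bState s).2.2 = []) ∨
    (∃ q t, (bState s).1 = some q ∧ (q = '\'' ∨ q = '"') ∧
      (if q = '\'' then (rciState s).1.getLast? = some t else (rciState s).2.1.getLast? = some t) ∧
      (bState s).2.1 = (aFilter s).filter (fun p => decide (p < t)) ∧
      (bState s).2.2 = (aFilter s).filter (fun p => decide (t < p))))

lemma inv_all (s : List Char) : pvInv s := by
  induction s using List.reverseRecOn with
  | nil =>
    refine ⟨rfl, rfl, ?_, ?_, ?_, ?_, ?_, ?_, Or.inl ⟨rfl, rfl, rfl⟩⟩ <;>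
      simp [rciState, bState, posP, PySem.List.enumerate_nil]
  | append_singleton s c ih =>
    obtain ⟨i1, i2, i3, i4, i5, i6, i7, i8, i9⟩ := ih
    rcases hbs : bState s with ⟨m, res, pend⟩
    rcases hrs : rciState s with ⟨c1, c2, o1, o2⟩
    rw [hbs, hrs] at i1 i2 i3 i4 i9
    rw [hrs] at i5 i6 i7 i8
    dsimp only at i1 i2 i3 i4 i5 i6 i7 i8 i9
    have hb1 : ∀ x ∈ c1, x < (s.length : Int) := fun x hx => (posP_bounds _ _ _ (i7 x hx)).2
    have hb2 : ∀ x ∈ c2, x < (s.length : Int) := fun x hx => (posP_bounds _ _ _ (i8 x hx)).2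
    have hn1 : (s.length : Int) ∉ c1 := fun h => lt_irrefl _ (hb1 _ h)
    have hn2 : (s.length : Int) ∉ c2 := fun h => lt_irrefl _ (hb2 _ h)
    by_cases hc1 : c = '\''
    · subst hc1
      have hR0 := rciState_append_q1 s
      rw [hrs] at hR0
      dsimp only at hR0
      have hB0 := bState_append s '\''
      rw [hbs] at hB0
      rcases i9 with ⟨hm, hres, hpend⟩ | ⟨q, t, hm, hq, ht, hres, hpend⟩
      · -- opening a single quote
        subst hm
        have ho1 : o1 = false := by simpa using i1
        have ho2 : o2 = false := by simpa using i2
        subst ho1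
        subst ho2
        have hR : rciState (s ++ ['\'']) = (c1 ++ [(s.length : Int)], c2, true, false) := by
          rw [hR0]
          have hmem : (s.length : Int) ∈ c1 ++ [(s.length : Int)] := by simp
          simp [pvRciStep, hmem]
        have hBc : bState (s ++ ['\'']) = (some '\'', res, []) := by
          rw [hB0]
          simp [pvAltStep]
        have heven : c1.length % 2 = 0 := by
          rcases Nat.mod_two_eq_zero_or_one c1.length with h | h
          · exact h
          · exact absurd (i3.mp h) (by simp)
        have hA : aFilter (s ++ ['\'']) = aFilter s := by
          unfold aFilter
          rw [hR, hrs, posP_append]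
          dsimp only
          simp only [show isSC '\'' = false from rfl, Bool.false_eq_true, if_false,
            List.append_nil]
          exact List.filter_congr (fun p _ => by rw [between_append_even c1 _ p heven])
        refine ⟨?_, ?_, ?_, ?_, ?_, ?_, ?_, ?_, ?_⟩
        · rw [hR, hBc]; rfl
        · rw [hR, hBc]; rfl
        · rw [hR, hBc]
          dsimp only
          simp only [List.length_append, List.length_cons, List.length_nil]
          constructor
          · intro _; trivial
          · intro _; omega
        · rw [hR, hBc]
          exact ⟨fun h => absurd (i4.mp h) (by simp), fun h => by simp at h⟩
        · rw [hR]; exact pairwise_append_lt _ _ i5 hb1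
        · rw [hR]; exact i6
        · rw [hR, posP_append]
          intro x hx
          rcases List.mem_append.mp hx with hx | hx
          · exact List.mem_append_left _ (i7 x hx)
          · refine List.mem_append_right _ ?_
            simp only [List.mem_singleton] at hx
            subst hx
            simp [isQ1]
        · rw [hR]; exact fun x hx => posP_mono _ _ _ _ (i8 x hx)
        · rw [hR, hBc, hA]
          refine Or.inr ⟨'\'', (s.length : Int), rfl, Or.inl rfl, by simp, ?_, ?_⟩
          · rw [hres]
            exact (List.filter_eq_self.mpr (fun p hp => decide_eq_true
              (posP_bounds _ _ _ (mem_aFilter_sc _ _ hp)).2)).symm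
          · exact (List.filter_eq_nil_iff.mpr (fun p hp => by
              have := (posP_bounds _ _ _ (mem_aFilter_sc _ _ hp)).2
              simp
              omega)).symm
      · subst hm
        rcases hq with hq | hq
        · -- closing the single quote
          subst hq
          have ho1 : o1 = true := by simpa using i1
          have ho2 : o2 = false := by simpa using i2
          subst ho1
          subst ho2
          have hodd : c1.length % 2 = 1 := i3.mpr rfl
          have ht' : c1.getLast? = some t := by simpa using ht
          have htc1 : t ∈ c1 := mem_of_getLast?' _ _ ht'
          have htq : t ∈ posP isQ1 s := i7 t htc1
          have hR : rciState (s ++ ['\'']) = (c1 ++ [(s.length : Int)], c2, false, false) := by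
            rw [hR0]
            have hmem : (s.length : Int) ∈ c1 ++ [(s.length : Int)] := by simp
            simp [pvRciStep, hmem]
          have hBc : bState (s ++ ['\'']) = (none, res, []) := by
            rw [hB0]
            simp [pvAltStep]
          have hA : aFilter (s ++ ['\'']) =
              (aFilter s).filter (fun p => decide (p < t)) := by
            unfold aFilter
            rw [hR, hrs, posP_append]
            dsimp only
            simp only [show isSC '\'' = false from rfl, Bool.false_eq_true, if_false,
              List.append_nil]
            rw [List.filter_filter]
            refine List.filter_congr (fun p hp => ?_)
            rw [between_append_odd c1 _ p t hodd ht']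
            have hpn : p < (s.length : Int) := (posP_bounds _ _ _ hp).2
            have hpt : p ≠ t := sc_ne_q s p t hp (Or.inl htq)
            rcases lt_or_gt_of_ne hpt with hlt | hgt
            · simp [decide_eq_false (by omega : ¬ t < p), decide_eq_true hlt]
            · simp [decide_eq_true hgt, decide_eq_false (by omega : ¬ p < t),
                decide_eq_true hpn]
          refine ⟨?_, ?_, ?_, ?_, ?_, ?_, ?_, ?_, ?_⟩
          · rw [hR, hBc]; rfl
          · rw [hR, hBc]; rfl
          · rw [hR, hBc]
            dsimp only
            simp only [List.length_append, List.length_cons, List.length_nil]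
            constructor
            · intro h; exact absurd h (by omega)
            · intro h; simp at h
          · rw [hR, hBc]
            exact ⟨fun h => absurd (i4.mp h) (by simp), fun h => by simp at h⟩
          · rw [hR]; exact pairwise_append_lt _ _ i5 hb1
          · rw [hR]; exact i6
          · rw [hR, posP_append]
            intro x hx
            rcases List.mem_append.mp hx with hx | hx
            · exact List.mem_append_left _ (i7 x hx)
            · refine List.mem_append_right _ ?_
              simp only [List.mem_singleton] at hx
              subst hx
              simp [isQ1]
          · rw [hR]; exact fun x hx => posP_mono _ _ _ _ (i8 x hx)
          · rw [hR, hBc, hA]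
            exact Or.inl ⟨rfl, hres, rfl⟩
        · -- a single quote inside open double quotes: removed
          subst hq
          have ho1 : o1 = false := by simpa using i1
          have ho2 : o2 = true := by simpa using i2
          subst ho1
          subst ho2
          have hR : rciState (s ++ ['\'']) = (c1, c2, false, true) := by
            rw [hR0]
            have hmem : (s.length : Int) ∈ c1 ++ [(s.length : Int)] := by simp
            have herase : (c1 ++ [(s.length : Int)]).erase (s.length : Int) = c1 := by
              rw [List.erase_append_right _ hn1]
              simp
            simp [pvRciStep, hmem, PySem.List.remove?_eq_some_erase _ _ hmem, herase,
              pvRciSecond, hn2]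
          have hBc : bState (s ++ ['\'']) = (some '"', res, pend) := by
            rw [hB0]
            simp [pvAltStep]
          have hA : aFilter (s ++ ['\'']) = aFilter s := by
            unfold aFilter
            rw [hR, hrs, posP_append]
            dsimp only
            simp [show isSC '\'' = false from rfl]
          refine ⟨?_, ?_, ?_, ?_, ?_, ?_, ?_, ?_, ?_⟩
          · rw [hR, hBc]; exact i1
          · rw [hR, hBc]; exact i2
          · rw [hR, hBc]; exact i3
          · rw [hR, hBc]; exact i4
          · rw [hR]; exact i5
          · rw [hR]; exact i6
          · rw [hR]; exact fun x hx => posP_mono _ _ _ _ (i7 x hx)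
          · rw [hR]; exact fun x hx => posP_mono _ _ _ _ (i8 x hx)
          · rw [hR, hBc, hA]
            exact Or.inr ⟨'"', t, rfl, Or.inr rfl, ht, hres, hpend⟩
    · by_cases hc2 : c = '"'
      · subst hc2
        have hR0 := rciState_append_q2 s
        rw [hrs] at hR0
        dsimp only at hR0
        have hB0 := bState_append s '"'
        rw [hbs] at hB0
        rcases i9 with ⟨hm, hres, hpend⟩ | ⟨q, t, hm, hq, ht, hres, hpend⟩
        · -- opening a double quote
          subst hm
          have ho1 : o1 = false := by simpa using i1
          have ho2 : o2 = false := by simpa using i2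
          subst ho1
          subst ho2
          have hR : rciState (s ++ ['"']) = (c1, c2 ++ [(s.length : Int)], false, true) := by
            rw [hR0]
            have hmem : (s.length : Int) ∈ c2 ++ [(s.length : Int)] := by simp
            simp [pvRciStep, pvRciSecond, hn1, hmem]
          have hBc : bState (s ++ ['"']) = (some '"', res, []) := by
            rw [hB0]
            simp [pvAltStep]
          have heven : c2.length % 2 = 0 := by
            rcases Nat.mod_two_eq_zero_or_one c2.length with h | h
            · exact h
            · exact absurd (i4.mp h) (by simp)
          have hA : aFilter (s ++ ['"']) = aFilter s := by
            unfold aFilter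
            rw [hR, hrs, posP_append]
            dsimp only
            simp only [show isSC '"' = false from rfl, Bool.false_eq_true, if_false,
              List.append_nil]
            exact List.filter_congr (fun p _ => by rw [between_append_even c2 _ p heven])
          refine ⟨?_, ?_, ?_, ?_, ?_, ?_, ?_, ?_, ?_⟩
          · rw [hR, hBc]; rfl
          · rw [hR, hBc]; rfl
          · rw [hR, hBc]
            exact ⟨fun h => absurd (i3.mp h) (by simp), fun h => by simp at h⟩
          · rw [hR, hBc]
            dsimp only
            simp only [List.length_append, List.length_cons, List.length_nil]
            constructor
            · intro _; trivial
            · intro _; omega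
          · rw [hR]; exact i5
          · rw [hR]; exact pairwise_append_lt _ _ i6 hb2
          · rw [hR]; exact fun x hx => posP_mono _ _ _ _ (i7 x hx)
          · rw [hR, posP_append]
            intro x hx
            rcases List.mem_append.mp hx with hx | hx
            · exact List.mem_append_left _ (i8 x hx)
            · refine List.mem_append_right _ ?_
              simp only [List.mem_singleton] at hx
              subst hx
              simp [isQ2]
          · rw [hR, hBc, hA]
            refine Or.inr ⟨'"', (s.length : Int), rfl, Or.inr rfl, ?_, ?_, ?_⟩
            · rw [if_neg (by decide)]
              simp
            · rw [hres]
              exact (List.filter_eq_self.mpr (fun p hp => decide_eq_true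
                (posP_bounds _ _ _ (mem_aFilter_sc _ _ hp)).2)).symm
            · exact (List.filter_eq_nil_iff.mpr (fun p hp => by
                have := (posP_bounds _ _ _ (mem_aFilter_sc _ _ hp)).2
                simp
                omega)).symm
        · subst hm
          rcases hq with hq | hq
          · -- a double quote inside open single quotes: removed
            subst hq
            have ho1 : o1 = true := by simpa using i1
            have ho2 : o2 = false := by simpa using i2
            subst ho1
            subst ho2
            have hR : rciState (s ++ ['"']) = (c1, c2, true, false) := by
              rw [hR0]
              have hmem : (s.length : Int) ∈ c2 ++ [(s.length : Int)] := by simp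
              have herase : (c2 ++ [(s.length : Int)]).erase (s.length : Int) = c2 := by
                rw [List.erase_append_right _ hn2]
                simp
              simp [pvRciStep, pvRciSecond, hn1, hmem,
                PySem.List.remove?_eq_some_erase _ _ hmem, herase]
            have hBc : bState (s ++ ['"']) = (some '\'', res, pend) := by
              rw [hB0]
              simp [pvAltStep]
            have hA : aFilter (s ++ ['"']) = aFilter s := by
              unfold aFilter
              rw [hR, hrs, posP_append]
              dsimp only
              simp [show isSC '"' = false from rfl]
            refine ⟨?_, ?_, ?_, ?_, ?_, ?_, ?_, ?_, ?_⟩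
            · rw [hR, hBc]; exact i1
            · rw [hR, hBc]; exact i2
            · rw [hR, hBc]; exact i3
            · rw [hR, hBc]; exact i4
            · rw [hR]; exact i5
            · rw [hR]; exact i6
            · rw [hR]; exact fun x hx => posP_mono _ _ _ _ (i7 x hx)
            · rw [hR]; exact fun x hx => posP_mono _ _ _ _ (i8 x hx)
            · rw [hR, hBc, hA]
              exact Or.inr ⟨'\'', t, rfl, Or.inl rfl, ht, hres, hpend⟩
          · -- closing the double quote
            subst hq
            have ho1 : o1 = false := by simpa using i1
            have ho2 : o2 = true := by simpa using i2
            subst ho1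
            subst ho2
            have hodd : c2.length % 2 = 1 := i4.mpr rfl
            have ht' : c2.getLast? = some t := by
              rw [if_neg (by decide)] at ht
              exact ht
            have htc2 : t ∈ c2 := mem_of_getLast?' _ _ ht'
            have htq : t ∈ posP isQ2 s := i8 t htc2
            have hR : rciState (s ++ ['"']) = (c1, c2 ++ [(s.length : Int)], false, false) := by
              rw [hR0]
              have hmem : (s.length : Int) ∈ c2 ++ [(s.length : Int)] := by simp
              simp [pvRciStep, pvRciSecond, hn1, hmem]
            have hBc : bState (s ++ ['"']) = (none, res, []) := by
              rw [hB0]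
              simp [pvAltStep]
            have hA : aFilter (s ++ ['"']) =
                (aFilter s).filter (fun p => decide (p < t)) := by
              unfold aFilter
              rw [hR, hrs, posP_append]
              dsimp only
              simp only [show isSC '"' = false from rfl, Bool.false_eq_true, if_false,
                List.append_nil]
              rw [List.filter_filter]
              refine List.filter_congr (fun p hp => ?_)
              rw [between_append_odd c2 _ p t hodd ht']
              have hpn : p < (s.length : Int) := (posP_bounds _ _ _ hp).2
              have hpt : p ≠ t := sc_ne_q s p t hp (Or.inr htq)
              rcases lt_or_gt_of_ne hpt with hlt | hgt
              · simp [decide_eq_false (by omega : ¬ t < p), decide_eq_true hlt]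
              · simp [decide_eq_true hgt, decide_eq_false (by omega : ¬ p < t),
                  decide_eq_true hpn]
            refine ⟨?_, ?_, ?_, ?_, ?_, ?_, ?_, ?_, ?_⟩
            · rw [hR, hBc]; rfl
            · rw [hR, hBc]; rfl
            · rw [hR, hBc]
              exact ⟨fun h => absurd (i3.mp h) (by simp), fun h => by simp at h⟩
            · rw [hR, hBc]
              dsimp only
              simp only [List.length_append, List.length_cons, List.length_nil]
              constructor
              · intro h; exact absurd h (by omega)
              · intro h; simp at h
            · rw [hR]; exact i5
            · rw [hR]; exact pairwise_append_lt _ _ i6 hb2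
            · rw [hR]; exact fun x hx => posP_mono _ _ _ _ (i7 x hx)
            · rw [hR, posP_append]
              intro x hx
              rcases List.mem_append.mp hx with hx | hx
              · exact List.mem_append_left _ (i8 x hx)
              · refine List.mem_append_right _ ?_
                simp only [List.mem_singleton] at hx
                subst hx
                simp [isQ2]
            · rw [hR, hBc, hA]
              exact Or.inl ⟨rfl, hres, rfl⟩
      · by_cases hcs : c = ';'
        · subst hcs
          have hR : rciState (s ++ [';']) = (c1, c2, o1, o2) := by
            rw [rciState_append_other s ';' (by decide)]
            exact hrs
          have hB0 := bState_append s ';'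
          rw [hbs] at hB0
          have hA : aFilter (s ++ [';']) = aFilter s ++ [(s.length : Int)] := by
            unfold aFilter
            rw [hR, hrs, posP_append]
            dsimp only
            rw [show isSC ';' = true from rfl, if_pos rfl, List.filter_append]
            have e1 : pvIsBetween (s.length : Int) c1 = false := between_ge _ _ hb1
            have e2 : pvIsBetween (s.length : Int) c2 = false := between_ge _ _ hb2
            simp [e1, e2]
          rcases i9 with ⟨hm, hres, hpend⟩ | ⟨q, t, hm, hq, ht, hres, hpend⟩
          · -- a real semicolon
            subst hm
            have hBc : bState (s ++ [';']) = (none, res ++ [(s.length : Int)], pend) := by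
              rw [hB0]
              simp [pvAltStep]
            refine ⟨?_, ?_, ?_, ?_, ?_, ?_, ?_, ?_, ?_⟩
            · rw [hR, hBc]; exact i1
            · rw [hR, hBc]; exact i2
            · rw [hR, hBc]; exact i3
            · rw [hR, hBc]; exact i4
            · rw [hR]; exact i5
            · rw [hR]; exact i6
            · rw [hR]; exact fun x hx => posP_mono _ _ _ _ (i7 x hx)
            · rw [hR]; exact fun x hx => posP_mono _ _ _ _ (i8 x hx)
            · rw [hR, hBc, hA]
              exact Or.inl ⟨rfl, by rw [hres], hpend⟩
          · -- a semicolon while a quote is open: pending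
            subst hm
            have hBc : bState (s ++ [';']) = (some q, res, pend ++ [(s.length : Int)]) := by
              rw [hB0]
              simp [pvAltStep]
            have htn : t < (s.length : Int) := by
              split_ifs at ht with hq'
              · exact hb1 t (mem_of_getLast?' _ _ ht)
              · exact hb2 t (mem_of_getLast?' _ _ ht)
            refine ⟨?_, ?_, ?_, ?_, ?_, ?_, ?_, ?_, ?_⟩
            · rw [hR, hBc]; exact i1
            · rw [hR, hBc]; exact i2
            · rw [hR, hBc]; exact i3
            · rw [hR, hBc]; exact i4
            · rw [hR]; exact i5
            · rw [hR]; exact i6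
            · rw [hR]; exact fun x hx => posP_mono _ _ _ _ (i7 x hx)
            · rw [hR]; exact fun x hx => posP_mono _ _ _ _ (i8 x hx)
            · rw [hR, hBc, hA]
              refine Or.inr ⟨q, t, rfl, hq, ht, ?_, ?_⟩
              · rw [List.filter_append, hres]
                simp [decide_eq_false (not_lt.mpr htn.le)]
              · rw [List.filter_append, hpend]
                simp [decide_eq_true htn]
        · -- any other character: nothing changes
          have hqq : isQQ c = false := by simp [isQQ, hc1, hc2]
          have hsc : isSC c = false := by simp [isSC, hcs]
          have hR : rciState (s ++ [c]) = (c1, c2, o1, o2) := by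
            rw [rciState_append_other s c hqq]
            exact hrs
          have hBc : bState (s ++ [c]) = (m, res, pend) := by
            rw [bState_append, hbs]
            have e1 : (c == ';') = false := by simp [hcs]
            have e2 : (c == '\'' || c == '"') = false := by simp [hc1, hc2]
            cases m <;> simp [pvAltStep, e1, e2]
          have hA : aFilter (s ++ [c]) = aFilter s := by
            unfold aFilter
            rw [hR, hrs, posP_append, hsc]
            simp
          refine ⟨?_, ?_, ?_, ?_, ?_, ?_, ?_, ?_, ?_⟩
          · rw [hR, hBc]; exact i1
          · rw [hR, hBc]; exact i2
          · rw [hR, hBc]; exact i3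
          · rw [hR, hBc]; exact i4
          · rw [hR]; exact i5
          · rw [hR]; exact i6
          · rw [hR]; exact fun x hx => posP_mono _ _ _ _ (i7 x hx)
          · rw [hR]; exact fun x hx => posP_mono _ _ _ _ (i8 x hx)
          · rw [hR, hBc, hA]
            exact i9

lemma aCore_eq (string : String) : find_real_semicols_py string = aFilter string.toList := by
  have h1 : find_real_semicols_py string =
      (pvRemoveFromList (pvGetCharPositions ";" string.toList)
          (pvCommentedPositions string.toList)).foldl
        (fun acc pos =>
          if (!(pvIsBetween pos (pvRemoveCharsInside
                (pvRemoveFromList (pvGetCharPositions "'" string.toList)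
                  (pvCommentedPositions string.toList))
                (pvRemoveFromList (pvGetCharPositions "\"" string.toList)
                  (pvCommentedPositions string.toList))).1 ||
              pvIsBetween pos (pvRemoveCharsInside
                (pvRemoveFromList (pvGetCharPositions "'" string.toList)
                  (pvCommentedPositions string.toList))
                (pvRemoveFromList (pvGetCharPositions "\"" string.toList)
                  (pvCommentedPositions string.toList))).2)) = true
          then acc ++ [pos] else acc) [] := rfl
  rw [h1, commentedPositions_nil]
  have hrn : ∀ l : List Int, pvRemoveFromList l [] = l := fun l => rfl
  have h2 : pvRemoveCharsInside (posP isQ1 string.toList) (posP isQ2 string.toList) =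
      ((List.foldl pvRciStep (posP isQ1 string.toList, posP isQ2 string.toList, false, false)
          (PySem.List.sorted (posP isQ1 string.toList ++ posP isQ2 string.toList)
            (fun x => x))).1,
        (List.foldl pvRciStep (posP isQ1 string.toList, posP isQ2 string.toList, false, false)
          (PySem.List.sorted (posP isQ1 string.toList ++ posP isQ2 string.toList)
            (fun x => x))).2.1) := rfl
  simp only [hrn, getCharPositions_q1, getCharPositions_q2, getCharPositions_sc, h2,
    sorted_q1_q2]
  unfold aFilter rciState
  rw [PySem.List.foldl_append_if_eq_filter]
  simp

lemma bCore_eq (string : String) : find_real_semicols_py_alt string = aFilter string.toList := by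
  have hInv := inv_all string.toList
  unfold pvInv at hInv
  unfold find_real_semicols_py_alt
  rw [show (PySem.List.enumerate string.toList).foldl pvAltStep (none, [], []) =
      bState string.toList from rfl]
  rcases hInv with ⟨-, -, -, -, -, -, h7, h8, hcase⟩
  rcases hb : bState string.toList with ⟨mode, res, pend⟩
  rw [hb] at hcase
  rcases hcase with ⟨hm, hres, -⟩ | ⟨q, t, hm, -, ht, hres, hpend⟩
  · dsimp only at hm hres
    subst hm
    simpa using hres
  · dsimp only at hm hres hpend
    subst hm
    dsimp only
    rw [hres, hpend]
    apply filter_lt_append_filter_gt _ _ (aFilter_pairwise _)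
    intro p hp
    have hps := mem_aFilter_sc _ _ hp
    split_ifs at ht with hq
    · exact sc_ne_q _ _ _ hps (Or.inl (h7 t (mem_of_getLast?' _ _ ht)))
    · exact sc_ne_q _ _ _ hps (Or.inr (h8 t (mem_of_getLast?' _ _ ht)))

-- ===== VERDICT (by name: the statement is the Claim_ definition above) =====
theorem find_real_semicols_py_spec : Claim_equal_find_real_semicols_py := by
  intro string _
  unfold Spec_find_real_semicols_py
  rw [aCore_eq, bCore_eq]
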